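-- pv_equiv track=rewrite | github.com/codamin/Data-Structures-Algorithms | CA3/q2.py | getmmin
-- ===== SOURCE A (Python) =====
-- def getmmin(numbers, n, k):
--     min = 0
--     for i in range(n):
--         if(numbers[i]==1):
--             min += 2
--             for j in range(k):
--                 if(i + j >= n):
--                     break
--                 if numbers[i+j] == 0:
--                     numbers[i + j] = 2
--                 elif numbers[i + j] == 1:
--                     numbers[i+j] = 0
--                 else:
--                     numbers[i + j] = 1
--         elif(numbers[i]==2):
--             min += 1
--             for j in range(k):
--                 if(i + j >= n):
--                     break
--                 if numbers[i+j] == 0 or numbers[i+j] == 1: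
--                     numbers[i + j] += 1
--                 else:
--                     numbers[i + j] = 0
--     return min
-- ===== SOURCE B (Python) =====
-- # Sliding-window of per-step mod-3 shift amounts: one pass instead of
-- # rewriting up to k cells per step.  (A mutates `numbers` in place; B does not —
-- # the agreement is about the return value.)
-- def getmmin(numbers, n, k):
--     cost = 0
--     shifts = []
--     S = 0  # net mod-3 shift currently applied to the cell being read
--     for i in range(n):
--         t = -(numbers[i] + S) % 3  # increments needed to bring this cell to 0
--         cost += t
--         shifts.append(t)
--         if k > 1:  # the shift also covers the next k-1 cells
--             S = (S + t) % 3
--             j = i + 1 - k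
--             if j >= 0:  # the shift made at j no longer covers cell i+1
--                 S = (S - shifts[j]) % 3
--     return cost
-- ===== Notes on version B (the rewrite author's own statement) =====
-- stated objective: alternative
-- what changed: B makes one pass with a sliding window over per-step mod-3 shift amounts (running sum S) instead of A's rewriting of up to k cells per step; Pre_ excludes n beyond the list length (A raises IndexError) and inputs whose scanned prefix numbers[:n] holds a value outside the ternary domain {0,1,2}, where A's if-chain handling of such values is accidental; A mutates its argument in place, B does not (return values agree).
-- outside the precondition, e.g. on getmmin([4], 1, 1): A returns 0, B returns 2
import Mathlib
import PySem

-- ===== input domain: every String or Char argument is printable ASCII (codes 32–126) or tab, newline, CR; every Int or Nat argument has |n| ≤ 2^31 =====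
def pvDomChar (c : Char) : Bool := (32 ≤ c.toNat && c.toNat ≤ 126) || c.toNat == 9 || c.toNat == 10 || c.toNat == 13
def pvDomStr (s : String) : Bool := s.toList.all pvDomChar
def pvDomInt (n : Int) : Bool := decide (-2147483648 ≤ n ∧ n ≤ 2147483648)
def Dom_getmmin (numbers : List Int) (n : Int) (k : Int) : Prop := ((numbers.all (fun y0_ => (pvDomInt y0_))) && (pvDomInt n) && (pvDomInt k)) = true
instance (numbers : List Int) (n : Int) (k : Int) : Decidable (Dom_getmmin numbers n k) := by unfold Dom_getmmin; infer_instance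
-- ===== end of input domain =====

-- B replaces A's per-step rewriting of up to k cells by one pass with a sliding window of
-- mod-3 shift amounts; A mutates its argument list in place, B does not —
-- the equivalence proved here is about the return value.

-- ===== PORT A =====
-- inner loop of the `numbers[i]==1` branch
def getmminLoop1 (n k : Int) (nums : List Int) (i : Int) (j : Int) : List Int :=
  if _h : j < k then
    if i + j ≥ n then nums
    else
      let x := PySem.List.pyGetD nums (i + j) 0
      getmminLoop1 n k
        (if x = 0 then PySem.List.pySetD nums (i + j) 2
         else if x = 1 then PySem.List.pySetD nums (i + j) 0
         else PySem.List.pySetD nums (i + j) 1) i (j + 1)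
  else nums
termination_by (k - j).toNat
decreasing_by omega

-- inner loop of the `numbers[i]==2` branch
def getmminLoop2 (n k : Int) (nums : List Int) (i : Int) (j : Int) : List Int :=
  if _h : j < k then
    if i + j ≥ n then nums
    else
      let x := PySem.List.pyGetD nums (i + j) 0
      getmminLoop2 n k
        (if x = 0 ∨ x = 1 then PySem.List.pySetD nums (i + j) (x + 1)
         else PySem.List.pySetD nums (i + j) 0) i (j + 1)
  else nums
termination_by (k - j).toNat
decreasing_by omega

def getmminOuter (n k : Int) (i : Int) (nums : List Int) (m : Int) : Int :=
  if _h : i < n then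
    let x := PySem.List.pyGetD nums i 0
    if x = 1 then getmminOuter n k (i + 1) (getmminLoop1 n k nums i 0) (m + 2)
    else if x = 2 then getmminOuter n k (i + 1) (getmminLoop2 n k nums i 0) (m + 1)
    else getmminOuter n k (i + 1) nums m
  else m
termination_by (n - i).toNat
decreasing_by all_goals omega

def getmmin (numbers : List Int) (n : Int) (k : Int) : Int :=
  getmminOuter n k 0 numbers 0

-- ===== PORT B =====
def getmminAltLoop (numbers : List Int) (n k : Int) (i cost : Int) (shifts : List Int) (S : Int) : Int :=
  if _h : i < n then
    let t := PySem.Int.mod (-(PySem.List.pyGetD numbers i 0 + S)) 3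
    let shifts' := shifts ++ [t]
    if k > 1 then
      let S1 := PySem.Int.mod (S + t) 3
      let j := i + 1 - k
      if j ≥ 0 then
        getmminAltLoop numbers n k (i + 1) (cost + t) shifts'
          (PySem.Int.mod (S1 - PySem.List.pyGetD shifts' j 0) 3)
      else getmminAltLoop numbers n k (i + 1) (cost + t) shifts' S1
    else getmminAltLoop numbers n k (i + 1) (cost + t) shifts' S
  else cost
termination_by (n - i).toNat
decreasing_by all_goals omega

def getmmin_alt (numbers : List Int) (n : Int) (k : Int) : Int :=
  getmminAltLoop numbers n k 0 0 [] 0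

-- ===== PRECONDITION & SPEC =====
-- Pre_ excludes n larger than the list (A raises IndexError) and inputs whose scanned
-- prefix numbers[:n] holds a value outside the problem's ternary domain {0,1,2}, on which
-- A's if-chain handling is accidental.
def Pre_getmmin (numbers : List Int) (n : Int) (k : Int) : Prop :=
  n ≤ (numbers.length : Int) ∧ ∀ x ∈ numbers.take n.toNat, x = 0 ∨ x = 1 ∨ x = 2
instance (numbers : List Int) (n : Int) (k : Int) : Decidable (Pre_getmmin numbers n k) := by
  unfold Pre_getmmin; infer_instance
def pvWitness_getmmin : List Int × Int × Int := ([1, 2, 0, 1], 4, 2)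

def Spec_getmmin (numbers : List Int) (n : Int) (k : Int) (out : Int) : Prop := out = getmmin_alt numbers n k
instance (numbers : List Int) (n : Int) (k : Int) (out : Int) : Decidable (Spec_getmmin numbers n k out) := by unfold Spec_getmmin; infer_instance

-- ===== CLAIM =====
def Claim_equal_getmmin : Prop := ∀ (numbers : List Int) (n : Int) (k : Int), Dom_getmmin numbers n k → Pre_getmmin numbers n k → Spec_getmmin numbers n k (getmmin numbers n k)

-- ===== LEMMAS AND PROOFS =====

-- how any integer behaves under A's window maps
def pvC2 (v : Int) : Int := if v = 0 ∨ v = 1 then v else 2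

-- the shift window covering position p, given the per-step shifts ts (length p)
def pvWin (k : Int) (ts : List Int) (p : Nat) : List Int := ts.drop (((p : Int) + 1 - k).toNat)

-- value A's mutated list holds at position p (p ≥ ts.length) in terms of the original list
def pvRead (k : Int) (orig ts : List Int) (p : Nat) : Int :=
  (orig.getD p 0 + (pvWin k ts p).sum) % 3

theorem pvMod3 (a : Int) : PySem.Int.mod a 3 = a % 3 :=
  PySem.Int.mod_eq_emod_of_pos (by norm_num)

theorem pvLoop1_len (n k : Int) (nums : List Int) (i j : Int) :
    (getmminLoop1 n k nums i j).length = nums.length := by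
  fun_induction getmminLoop1 n k nums i j <;>
    first
      | rfl
      | (rename_i ih; split_ifs at ih ⊢ <;> simp_all [PySem.List.length_pySetD])

theorem pvLoop2_len (n k : Int) (nums : List Int) (i j : Int) :
    (getmminLoop2 n k nums i j).length = nums.length := by
  fun_induction getmminLoop2 n k nums i j <;>
    first
      | rfl
      | (rename_i ih; split_ifs at ih ⊢ <;> simp_all [PySem.List.length_pySetD])

theorem pvLoop1_getD (n k : Int) (nums : List Int) (i j : Int) :
    0 ≤ i → 0 ≤ j → n ≤ (nums.length : Int) → ∀ p : Nat,
    (getmminLoop1 n k nums i j).getD p 0 =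
      if i + j ≤ (p : Int) ∧ (p : Int) < i + k ∧ (p : Int) < n then
        (pvC2 (nums.getD p 0) + 2) % 3
      else nums.getD p 0 := by
  fun_induction getmminLoop1 n k nums i j with
  | case1 nums j hjk hbreak =>
      intro hi hj hn p
      rw [if_neg (by omega)]
  | case3 nums j hjk =>
      intro hi hj hn p
      rw [if_neg (by omega)]
  | case2 nums j hjk hbreak x ih =>
      intro hi hj hn p
      have hlt : i + j < n := by omega
      have hx : x = nums.getD (i + j).toNat 0 := by
        simp only [x]
        exact PySem.List.pyGetD_of_nonneg nums 0 (by omega)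
      simp only [dite_eq_ite] at ih
      obtain ⟨v, hv1, hv2⟩ : ∃ v, (if x = 0 then PySem.List.pySetD nums (i + j) 2
            else if x = 1 then PySem.List.pySetD nums (i + j) 0
            else PySem.List.pySetD nums (i + j) 1) = PySem.List.pySetD nums (i + j) v ∧
            v = (pvC2 x + 2) % 3 := by
        split_ifs with h0 h1
        · exact ⟨2, rfl, by simp [pvC2, h0]⟩
        · exact ⟨0, rfl, by norm_num [pvC2, h1]⟩
        · exact ⟨1, rfl, by norm_num [pvC2, h0, h1]⟩
      rw [hv1] at ih
      have hmlen : (i + j).toNat < nums.length := by omega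
      have hsetd : PySem.List.pySetD nums (i + j) v = nums.set (i + j).toNat v :=
        PySem.List.pySetD_of_nonneg nums v (by omega)
      have hget : ∀ q : Nat, (nums.set (i + j).toNat v).getD q 0 =
          if (i + j).toNat = q then v else nums.getD q 0 := by
        intro q
        by_cases hq : (i + j).toNat = q
        · subst hq
          simp [List.getD_eq_getElem?_getD, List.getElem?_set, hmlen]
        · simp [List.getD_eq_getElem?_getD, List.getElem?_set, hq]
      specialize ih hi (by omega) (by rw [hsetd]; simp; omega) p
      rw [hv1, hsetd] at *
      rw [ih, hget p]
      by_cases hp : (i + j).toNat = p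
      · rw [if_pos hp, if_neg (by omega),
          if_pos (show i + j ≤ (p : Int) ∧ (p : Int) < i + k ∧ (p : Int) < n by omega),
          hv2, hx, hp]
      · rw [if_neg hp]
        by_cases hc : i + j ≤ (p : Int) ∧ (p : Int) < i + k ∧ (p : Int) < n
        · rw [if_pos (by omega), if_pos hc]
        · rw [if_neg (by omega), if_neg hc]

theorem pvLoop2_getD (n k : Int) (nums : List Int) (i j : Int) :
    0 ≤ i → 0 ≤ j → n ≤ (nums.length : Int) → ∀ p : Nat,
    (getmminLoop2 n k nums i j).getD p 0 =
      if i + j ≤ (p : Int) ∧ (p : Int) < i + k ∧ (p : Int) < n then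
        (pvC2 (nums.getD p 0) + 1) % 3
      else nums.getD p 0 := by
  fun_induction getmminLoop2 n k nums i j with
  | case1 nums j hjk hbreak =>
      intro hi hj hn p
      rw [if_neg (by omega)]
  | case3 nums j hjk =>
      intro hi hj hn p
      rw [if_neg (by omega)]
  | case2 nums j hjk hbreak x ih =>
      intro hi hj hn p
      have hlt : i + j < n := by omega
      have hx : x = nums.getD (i + j).toNat 0 := by
        simp only [x]
        exact PySem.List.pyGetD_of_nonneg nums 0 (by omega)
      simp only [dite_eq_ite] at ih
      obtain ⟨v, hv1, hv2⟩ : ∃ v, (if x = 0 ∨ x = 1 then PySem.List.pySetD nums (i + j) (x + 1)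
            else PySem.List.pySetD nums (i + j) 0) = PySem.List.pySetD nums (i + j) v ∧
            v = (pvC2 x + 1) % 3 := by
        split_ifs with h01
        · refine ⟨x + 1, rfl, ?_⟩
          rcases h01 with h | h <;> norm_num [pvC2, h]
        · rw [not_or] at h01
          exact ⟨0, rfl, by norm_num [pvC2, h01.1, h01.2]⟩
      rw [hv1] at ih
      have hmlen : (i + j).toNat < nums.length := by omega
      have hsetd : PySem.List.pySetD nums (i + j) v = nums.set (i + j).toNat v :=
        PySem.List.pySetD_of_nonneg nums v (by omega)
      have hget : ∀ q : Nat, (nums.set (i + j).toNat v).getD q 0 =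
          if (i + j).toNat = q then v else nums.getD q 0 := by
        intro q
        by_cases hq : (i + j).toNat = q
        · subst hq
          simp [List.getD_eq_getElem?_getD, List.getElem?_set, hmlen]
        · simp [List.getD_eq_getElem?_getD, List.getElem?_set, hq]
      specialize ih hi (by omega) (by rw [hsetd]; simp; omega) p
      rw [hv1, hsetd] at *
      rw [ih, hget p]
      by_cases hp : (i + j).toNat = p
      · rw [if_pos hp, if_neg (by omega),
          if_pos (show i + j ≤ (p : Int) ∧ (p : Int) < i + k ∧ (p : Int) < n by omega),
          hv2, hx, hp]
      · rw [if_neg hp]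
        by_cases hc : i + j ≤ (p : Int) ∧ (p : Int) < i + k ∧ (p : Int) < n
        · rw [if_pos (by omega), if_pos hc]
        · rw [if_neg (by omega), if_neg hc]

theorem pvC2_emod (a : Int) : pvC2 (a % 3) = a % 3 := by
  unfold pvC2
  split_ifs <;> omega

-- appending one shift amount changes the effective value of a later position p
-- exactly when that shift's window still covers p
theorem pvRead_step (k : Int) (orig ts : List Int) (t : Int) (p : Nat)
    (hp : ts.length ≤ p) :
    pvRead k orig (ts ++ [t]) p =
      if (p : Int) < (ts.length : Int) + k then
        (pvRead k orig ts p + t) % 3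
      else pvRead k orig ts p := by
  by_cases hcov : (p : Int) < (ts.length : Int) + k
  · have hwin : pvWin k (ts ++ [t]) p = pvWin k ts p ++ [t] := by
      unfold pvWin
      exact List.drop_append_of_le_length (by omega)
    rw [if_pos hcov]
    unfold pvRead
    rw [hwin]
    simp only [List.sum_append, List.sum_cons, List.sum_nil]
    omega
  · rw [if_neg hcov]
    have h1 : pvWin k (ts ++ [t]) p = [] := by
      unfold pvWin
      refine List.drop_eq_nil_of_le ?_
      simp
      omega
    have h2 : pvWin k ts p = [] := by
      unfold pvWin
      refine List.drop_eq_nil_of_le ?_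
      omega
    unfold pvRead
    rw [h1, h2]

-- one step of B's loop, with its window sum re-expressed through pvWin
theorem pvAlt_step (orig : List Int) (n k i cost S T : Int) (ts : List Int)
    (hi : 0 ≤ i) (hlt : i < n) (hlen : ts.length = i.toNat)
    (hS : S = (pvWin k ts i.toNat).sum % 3)
    (hT : T = PySem.Int.mod (-(PySem.List.pyGetD orig i 0 + S)) 3) :
    getmminAltLoop orig n k i cost ts S =
      getmminAltLoop orig n k (i + 1) (cost + T) (ts ++ [T])
        ((pvWin k (ts ++ [T]) (i + 1).toNat).sum % 3) := by
  conv_lhs => rw [getmminAltLoop]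
  rw [dif_pos hlt]
  dsimp only
  rw [← hT]
  by_cases hk : 1 < k
  case neg =>
    rw [if_neg hk]
    have h0 : pvWin k ts i.toNat = [] := by
      unfold pvWin; apply List.drop_eq_nil_of_le; omega
    have h1 : pvWin k (ts ++ [T]) (i + 1).toNat = [] := by
      unfold pvWin; apply List.drop_eq_nil_of_le; simp; omega
    rw [h0] at hS
    rw [h1, hS]
  case pos =>
    rw [if_pos hk]
    by_cases hj : i + 1 - k ≥ 0
    · rw [if_pos hj]
      have hmlt : (i + 1 - k).toNat < ts.length := by omega
      have hsj : PySem.List.pyGetD (ts ++ [T]) (i + 1 - k) 0 =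
          (ts ++ [T]).getD (i + 1 - k).toNat 0 :=
        PySem.List.pyGetD_of_nonneg _ 0 hj
      have hdrop : ts.drop (i + 1 - k).toNat =
          ts.getD (i + 1 - k).toNat 0 :: ts.drop ((i + 1 - k).toNat + 1) := by
        rw [List.getD_eq_getElem?_getD, List.getElem?_eq_getElem hmlt]
        exact List.drop_eq_getElem_cons hmlt
      have hw0 : pvWin k ts i.toNat = ts.drop (i + 1 - k).toNat := by
        unfold pvWin; congr 1; omega
      have hw1 : pvWin k (ts ++ [T]) (i + 1).toNat =
          ts.drop ((i + 1 - k).toNat + 1) ++ [T] := by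
        unfold pvWin
        rw [show (((i + 1 : Int).toNat : Int) + 1 - k).toNat = (i + 1 - k).toNat + 1 by omega]
        exact List.drop_append_of_le_length (by omega)
      have hsj2 : (ts ++ [T]).getD (i + 1 - k).toNat 0 = ts.getD (i + 1 - k).toNat 0 := by
        rw [List.getD_eq_getElem?_getD, List.getD_eq_getElem?_getD,
          List.getElem?_append_left hmlt]
      rw [hw0, hdrop] at hS
      rw [hw1, hsj, hsj2, hS]
      simp only [pvMod3, List.sum_cons, List.sum_append, List.sum_nil]
      congr 1
      omega
    · rw [if_neg hj]
      have h0 : pvWin k ts i.toNat = ts := by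
        unfold pvWin
        rw [show ((i.toNat : Int) + 1 - k).toNat = 0 by omega]
        rfl
      have h1 : pvWin k (ts ++ [T]) (i + 1).toNat = ts ++ [T] := by
        unfold pvWin
        rw [show (((i + 1 : Int).toNat : Int) + 1 - k).toNat = 0 by omega]
        rfl
      rw [h0] at hS
      rw [h1, hS]
      simp only [pvMod3, List.sum_append, List.sum_cons, List.sum_nil]
      congr 1
      omega

theorem pvMain (n k : Int) (orig : List Int) (hn : n ≤ (orig.length : Int)) :
    ∀ (fuel : Nat) (i : Int) (L ts : List Int) (S cost : Int),
      fuel = (n - i).toNat → 0 ≤ i → ts.length = i.toNat → L.length = orig.length →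
      (∀ p : Nat, i ≤ (p : Int) → (p : Int) < n → L.getD p 0 = pvRead k orig ts p) →
      S = (pvWin k ts i.toNat).sum % 3 →
      getmminOuter n k i L cost = getmminAltLoop orig n k i cost ts S := by
  intro fuel
  induction fuel with
  | zero =>
    intro i L ts S cost hf hi hlen hLlen h1 hS
    have hge : ¬ i < n := by omega
    rw [getmminOuter, getmminAltLoop]
    simp only [dif_neg hge]
  | succ f ih =>
    intro i L ts S cost hf hi hlen hLlen h1 hS
    by_cases hlt : i < n
    case neg =>
      rw [getmminOuter, getmminAltLoop]
      simp only [dif_neg hlt]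
    have hnL : n ≤ (L.length : Int) := by rw [hLlen]; exact hn
    have hreadL : PySem.List.pyGetD L i 0 = pvRead k orig ts i.toNat := by
      rw [PySem.List.pyGetD_of_nonneg L 0 hi]
      exact h1 i.toNat (by omega) (by omega)
    have hvorig : PySem.List.pyGetD orig i 0 = orig.getD i.toNat 0 :=
      PySem.List.pyGetD_of_nonneg orig 0 hi
    -- the step cost A picks from the (mutated) cell equals B's mod-3 complement t
    have hT : (if pvRead k orig ts i.toNat = 1 then (2 : Int)
               else if pvRead k orig ts i.toNat = 2 then 1 else 0) =
        PySem.Int.mod (-(PySem.List.pyGetD orig i 0 + S)) 3 := by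
      rw [hvorig, pvMod3, hS]
      unfold pvRead
      split_ifs <;> omega
    rw [getmminOuter, dif_pos hlt]
    dsimp only
    rw [hreadL]
    by_cases hx1 : pvRead k orig ts i.toNat = 1
    · rw [if_pos hx1,
        pvAlt_step orig n k i cost S 2 ts hi hlt hlen hS (by rw [← hT, if_pos hx1])]
      refine ih (i + 1) (getmminLoop1 n k L i 0) (ts ++ [2]) _ (cost + 2)
        (by omega) (by omega) (by simp [hlen]; omega)
        (by rw [pvLoop1_len]; exact hLlen) ?_ rfl
      intro p hp1 hp2
      have h := pvLoop1_getD n k L i 0 hi le_rfl hnL p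
      rw [h1 p (by omega) hp2] at h
      have hc2 : pvC2 (pvRead k orig ts p) = pvRead k orig ts p := pvC2_emod _
      rw [h, pvRead_step k orig ts 2 p (by omega),
        show ((ts.length : Int)) = i by omega, hc2]
      split_ifs <;> first | rfl | omega
    rw [if_neg hx1]
    by_cases hx2 : pvRead k orig ts i.toNat = 2
    · rw [if_pos hx2,
        pvAlt_step orig n k i cost S 1 ts hi hlt hlen hS
          (by rw [← hT, if_neg hx1, if_pos hx2])]
      refine ih (i + 1) (getmminLoop2 n k L i 0) (ts ++ [1]) _ (cost + 1)
        (by omega) (by omega) (by simp [hlen]; omega)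
        (by rw [pvLoop2_len]; exact hLlen) ?_ rfl
      intro p hp1 hp2
      have h := pvLoop2_getD n k L i 0 hi le_rfl hnL p
      rw [h1 p (by omega) hp2] at h
      have hc2 : pvC2 (pvRead k orig ts p) = pvRead k orig ts p := pvC2_emod _
      rw [h, pvRead_step k orig ts 1 p (by omega),
        show ((ts.length : Int)) = i by omega, hc2]
      split_ifs <;> first | rfl | omega
    rw [if_neg hx2,
      pvAlt_step orig n k i cost S 0 ts hi hlt hlen hS
        (by rw [← hT, if_neg hx1, if_neg hx2]), add_zero]
    refine ih (i + 1) L (ts ++ [0]) _ cost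
      (by omega) (by omega) (by simp [hlen]; omega) hLlen ?_ rfl
    intro p hp1 hp2
    rw [pvRead_step k orig ts 0 p (by omega)]
    rw [h1 p (by omega) hp2]
    split_ifs with h
    · unfold pvRead; omega
    · rfl

-- ===== VERDICT =====
theorem getmmin_spec : Claim_equal_getmmin := by
  intro numbers n k _hd hpre
  obtain ⟨hn, htern⟩ := hpre
  unfold Spec_getmmin getmmin getmmin_alt
  refine pvMain n k numbers hn (n - 0).toNat 0 numbers [] 0 0 rfl le_rfl rfl rfl ?_ (by simp [pvWin])
  intro p hp1 hp2
  have hlt : p < numbers.length := by omega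
  have hmem : numbers.getD p 0 ∈ numbers.take n.toNat := by
    have hlt' : p < (numbers.take n.toNat).length := by
      simp [List.length_take]; omega
    rw [List.getD_eq_getElem?_getD, List.getElem?_eq_getElem hlt]
    have := List.getElem_take (xs := numbers) (i := p) (h := hlt')
    rw [← this]
    exact List.getElem_mem hlt' 
  have := htern _ hmem
  unfold pvRead pvWin
  simp only [List.drop_nil, List.sum_nil, add_zero]
  omega
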